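-- pv_equiv track=rewrite | github.com/ShubhamBhisaji/AI-OP | aether-os/tools/code_formatter.py | _basic_format
-- ===== SOURCE A (Python) =====
-- def _basic_format(source: str) -> str:
--     """Normalize indentation to 4 spaces and trim trailing whitespace."""
--     lines = source.splitlines()
--     fixed = []
--     for line in lines:
--         # Normalize tab indentation to 4 spaces
--         stripped = line.lstrip("\t")
--         tab_count = len(line) - len(stripped)
--         fixed.append("    " * tab_count + stripped.rstrip())
--     # Remove excess blank lines (max 2 consecutive)
--     out: list[str] = []
--     blank_run = 0
--     for line in fixed:
--         if not line.strip():
--             blank_run += 1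
--             if blank_run <= 2:
--                 out.append(line)
--         else:
--             blank_run = 0
--             out.append(line)
--     result = "\n".join(out).rstrip() + "\n"
--     return f"[Formatted with built-in normalizer (install black for full formatting)]\n\n{result}"
-- ===== SOURCE B (Python) =====
-- def _basic_format(source: str) -> str:
--     """Normalize indentation to 4 spaces and trim trailing whitespace."""
--     def norm(line):
--         stripped = line.lstrip("\t")
--         return "    " * (len(line) - len(stripped)) + stripped.rstrip()
--
--     fixed = [norm(line) for line in source.splitlines()]
--     # collapse by maximal runs of equal blankness: keep at most the first 2
--     # lines of each blank run, every line of a non-blank run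
--     out = []
--     i, n = 0, len(fixed)
--     while i < n:
--         blank = not fixed[i].strip()
--         j = i + 1
--         while j < n and (not fixed[j].strip()) == blank:
--             j += 1
--         out.extend(fixed[i:j][:2] if blank else fixed[i:j])
--         i = j
--     result = "\n".join(out).rstrip() + "\n"
--     return f"[Formatted with built-in normalizer (install black for full formatting)]\n\n{result}"
-- ===== Notes on version B (the rewrite author's own statement) =====
-- stated objective: alternative
-- what changed: Replaces A's streaming blank_run counter with a run-grouping pass: B partitions the normalized lines into maximal runs of equal blankness by index scanning and emits each run by slicing (run[:2] for blank runs, the whole run otherwise), so no per-line counter state exists.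
import Mathlib
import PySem

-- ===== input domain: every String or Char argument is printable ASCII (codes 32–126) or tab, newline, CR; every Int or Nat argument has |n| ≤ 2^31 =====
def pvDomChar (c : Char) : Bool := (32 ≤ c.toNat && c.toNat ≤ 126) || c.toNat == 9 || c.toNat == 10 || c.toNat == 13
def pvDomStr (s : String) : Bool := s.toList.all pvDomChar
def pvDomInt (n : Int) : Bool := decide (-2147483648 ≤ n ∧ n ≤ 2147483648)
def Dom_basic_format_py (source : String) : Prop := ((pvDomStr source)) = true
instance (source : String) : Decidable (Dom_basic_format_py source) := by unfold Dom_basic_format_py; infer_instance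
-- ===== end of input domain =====

-- B replaces A's streaming blank_run counter with grouping into maximal runs of equal
-- blankness and slicing each run (blank runs truncated to 2); objective: alternative.

-- ===== PORT A =====
def pvHeader : List Char := "[Formatted with built-in normalizer (install black for full formatting)]\n\n".toList

def basic_format_py (source : String) : String :=
  let lines := PySem.Chars.splitlines source.toList
  -- first loop: build `fixed` (line.lstrip("\t") is exactly dropWhile (· == '\t'))
  let fixed := lines.foldl (fun acc line =>
    let stripped := line.dropWhile (· == '\t')
    let tab_count : Nat := line.length - stripped.length
    acc ++ [PySem.List.pyRepeat "    ".toList (tab_count : Int) ++ PySem.Chars.rstrip stripped]) []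
  -- second loop: drop blank runs longer than 2 with a blank_run counter
  let st := fixed.foldl (fun (st : List (List Char) × Nat) line =>
    if PySem.Chars.strip line = [] then
      let blank_run := st.2 + 1
      if blank_run ≤ 2 then (st.1 ++ [line], blank_run) else (st.1, blank_run)
    else (st.1 ++ [line], 0)) ([], 0)
  let result := PySem.Chars.rstrip (PySem.Chars.join ['\n'] st.1) ++ ['\n']
  String.ofList (pvHeader ++ result)

-- ===== PORT B =====
-- Source B's `norm(line)`
def pvNorm (line : List Char) : List Char :=
  let stripped := line.dropWhile (· == '\t')
  PySem.List.pyRepeat "    ".toList ((line.length - stripped.length : Nat) : Int)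
    ++ PySem.Chars.rstrip stripped

-- Source B's blankness test `not line.strip()`
def pvBlank (line : List Char) : Bool := PySem.Chars.strip line |>.isEmpty

-- Source B's run-grouping while loop: each step consumes one maximal run of equal blankness
-- (the inner `while j` index scan = takeWhile/dropWhile on the same predicate)
def pvCollapse : List (List Char) → List (List Char)
  | [] => []
  | l :: ls =>
    let run := (l :: ls).takeWhile (fun x => pvBlank x == pvBlank l)
    let rest := (l :: ls).dropWhile (fun x => pvBlank x == pvBlank l)
    (if pvBlank l then run.take 2 else run) ++ pvCollapse rest
termination_by ls => ls.length
decreasing_by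
  rw [List.dropWhile_cons_of_pos (by simp)]
  exact Nat.lt_succ_of_le (List.length_dropWhile_le _ _)

def basic_format_py_alt (source : String) : String :=
  let fixed := (PySem.Chars.splitlines source.toList).map pvNorm
  let out := pvCollapse fixed
  let result := PySem.Chars.rstrip (PySem.Chars.join ['\n'] out) ++ ['\n']
  String.ofList (pvHeader ++ result)

-- ===== PRECONDITION & SPEC =====
def Spec_basic_format_py (source : String) (out : String) : Prop := out = basic_format_py_alt source
instance (source : String) (out : String) : Decidable (Spec_basic_format_py source out) := by unfold Spec_basic_format_py; infer_instance

-- ===== CLAIM (what is proved, stated in full; the proofs are below) =====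
def Claim_equal_basic_format_py : Prop := ∀ (source : String), Dom_basic_format_py source → Spec_basic_format_py source (basic_format_py source)

-- ===== LEMMAS AND PROOFS =====

-- A's first loop is a map of pvNorm
lemma fixed_eq_map (lines : List (List Char)) (acc : List (List Char)) :
    lines.foldl (fun acc line =>
      let stripped := line.dropWhile (· == '\t')
      let tab_count : Nat := line.length - stripped.length
      acc ++ [PySem.List.pyRepeat "    ".toList (tab_count : Int) ++ PySem.Chars.rstrip stripped]) acc
    = acc ++ lines.map pvNorm := by
  induction lines generalizing acc with
  | nil => simp
  | cons l ls ih =>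
    rw [List.foldl_cons, ih]
    simp [pvNorm]

lemma collapse_cons (l : List Char) (ls : List (List Char)) :
    pvCollapse (l :: ls) =
      (if pvBlank l then ((l :: ls).takeWhile (fun x => pvBlank x == pvBlank l)).take 2
       else (l :: ls).takeWhile (fun x => pvBlank x == pvBlank l))
      ++ pvCollapse ((l :: ls).dropWhile (fun x => pvBlank x == pvBlank l)) := by
  rw [pvCollapse]

lemma collapse_nonblank_step (l : List Char) (ls : List (List Char)) (h : pvBlank l = false) :
    pvCollapse (l :: ls) = l :: pvCollapse ls := by
  rw [collapse_cons]
  simp only [h, Bool.false_eq_true, if_false, List.takeWhile_cons, List.dropWhile_cons,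
    beq_self_eq_true, if_pos, List.cons_append]
  congr 1
  cases ls with
  | nil => simp [pvCollapse]
  | cons l' ls' =>
    by_cases h' : pvBlank l' = false
    · rw [collapse_cons]
      simp [h']
    · simp only [Bool.not_eq_false] at h'
      simp [h']

lemma collapse_k0 (ls : List (List Char)) :
    pvCollapse ls = (ls.takeWhile pvBlank).take 2 ++ pvCollapse (ls.dropWhile pvBlank) := by
  cases ls with
  | nil => simp [pvCollapse]
  | cons l ls' =>
    by_cases h : pvBlank l = true
    · rw [collapse_cons]
      have he : (fun x => pvBlank x == pvBlank l) = pvBlank := by funext x; simp [h]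
      rw [he]
      simp [h]
    · simp only [Bool.not_eq_true] at h
      simp [h, collapse_nonblank_step l ls' h]

-- A's counter fold, characterized by run-grouping
lemma fold_eq_collapse (lines : List (List Char)) (acc : List (List Char)) (k : Nat) :
    (lines.foldl (fun (st : List (List Char) × Nat) line =>
      if PySem.Chars.strip line = [] then
        let blank_run := st.2 + 1
        if blank_run ≤ 2 then (st.1 ++ [line], blank_run) else (st.1, blank_run)
      else (st.1 ++ [line], 0)) (acc, k)).1
    = acc ++ (lines.takeWhile pvBlank).take (2 - k) ++ pvCollapse (lines.dropWhile pvBlank) := by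
  induction lines generalizing acc k with
  | nil => simp [pvCollapse]
  | cons l ls ih =>
    by_cases h : PySem.Chars.strip l = []
    · have hb : pvBlank l = true := by simp [pvBlank, h]
      simp only [List.foldl_cons, if_pos h, List.takeWhile_cons, List.dropWhile_cons, hb, if_pos]
      by_cases hk : k + 1 ≤ 2
      · simp only [if_pos hk]
        rw [ih]
        have h2 : 2 - k = (2 - (k + 1)) + 1 := by omega
        rw [h2, List.take_succ_cons]
        simp
      · simp only [if_neg hk]
        rw [ih]
        have h1 : 2 - k = 0 := by omega
        have h2 : 2 - (k + 1) = 0 := by omega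
        simp [h1, h2]
    · have hb : pvBlank l = false := by simp [pvBlank, h]
      simp only [List.foldl_cons, if_neg h]
      rw [ih]
      simp only [List.takeWhile_cons, List.dropWhile_cons, hb, Bool.false_eq_true, if_false,
        List.take_nil, List.append_nil]
      rw [collapse_nonblank_step l ls hb, show (2:Nat) - 0 = 2 from rfl, List.append_assoc, ← collapse_k0]
      simp

-- ===== VERDICT (by name: the statement is the Claim_ definition above) =====
theorem basic_format_py_spec : Claim_equal_basic_format_py := by
  intro source _
  simp only [Spec_basic_format_py, basic_format_py, basic_format_py_alt, fixed_eq_map,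
    List.nil_append]
  rw [fold_eq_collapse]
  simp only [List.nil_append, Nat.sub_zero, ← collapse_k0]
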